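-- pv_equiv track=rewrite | github.com/przcaden/Genetic-Graph-Miner | genetic-algorithm.py | edgeFitness
-- ===== SOURCE A (Python) =====
-- def edgeFitness(list_1, list_2):
--     fitness_score = 50
--     #compare the values in list 1 and list 2 and update fitness score depending on which one is closer
--     for i in range(len(list_1)):
--         for j in range(len(list_2)):
--             if list_1[i] <= list_2[j]:
--                 fitness_score -= list_1[i]
--             else:
--                 fitness_score -= list_2[j]
--
--     return fitness_score
-- ===== SOURCE B (Python) =====
-- def edgeFitness(list_1, list_2):
--     # sort list_2 once, build prefix sums, then answer each element of list_1
--     # with a binary search: sum of min(a,b) over all pairs, subtracted from 50.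
--     s = sorted(list_2)
--     prefix = [0]
--     acc = 0
--     for v in s:
--         acc += v
--         prefix.append(acc)
--     m = len(s)
--     total = 0
--     for a in list_1:
--         lo, hi = 0, m
--         while lo < hi:
--             mid = (lo + hi) // 2
--             if s[mid] < a:
--                 lo = mid + 1
--             else:
--                 hi = mid
--         total += prefix[lo] + a * (m - lo)
--     return 50 - total
-- ===== Notes on version B (the rewrite author's own statement) =====
-- stated objective: faster
-- what changed: Replaces the nested O(n*m) pairwise loop by sorting list_2 once, building prefix sums, and answering each element of list_1 with a binary search (sum of pairwise minimums subtracted from 50).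
import Mathlib
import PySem

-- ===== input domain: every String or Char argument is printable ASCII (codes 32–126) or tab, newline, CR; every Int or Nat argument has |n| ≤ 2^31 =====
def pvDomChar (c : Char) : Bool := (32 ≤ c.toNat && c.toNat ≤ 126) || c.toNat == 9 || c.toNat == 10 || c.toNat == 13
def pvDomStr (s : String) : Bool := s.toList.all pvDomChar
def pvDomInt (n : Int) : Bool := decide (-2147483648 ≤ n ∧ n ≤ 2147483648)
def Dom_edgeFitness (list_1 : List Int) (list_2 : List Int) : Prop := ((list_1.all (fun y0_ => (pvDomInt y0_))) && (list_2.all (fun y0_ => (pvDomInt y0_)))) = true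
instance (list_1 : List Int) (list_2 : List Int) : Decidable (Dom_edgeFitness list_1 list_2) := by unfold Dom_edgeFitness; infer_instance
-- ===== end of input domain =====

-- B replaces A's nested O(n*m) pairwise loop by sort + prefix sums + binary search (objective: faster).

-- ===== PORT A =====
def edgeFitness (list_1 : List Int) (list_2 : List Int) : Int :=
  (PySem.List.pyRange 0 (PySem.List.len list_1) 1).foldl (fun fitness_score i =>
    (PySem.List.pyRange 0 (PySem.List.len list_2) 1).foldl (fun fitness_score j =>
      if PySem.List.pyGetD list_1 i 0 ≤ PySem.List.pyGetD list_2 j 0 then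
        fitness_score - PySem.List.pyGetD list_1 i 0
      else
        fitness_score - PySem.List.pyGetD list_2 j 0) fitness_score) 50

-- ===== PORT B =====
-- the 'while lo < hi' binary-search loop of Source B
def pvBisect (s : List Int) (a : Int) (lo hi : Nat) : Nat :=
  if lo < hi then
    let mid := (lo + hi) / 2
    if s.getD mid 0 < a then pvBisect s a (mid + 1) hi
    else pvBisect s a lo mid
  else lo
termination_by hi - lo
decreasing_by all_goals omega

def edgeFitness_alt (list_1 : List Int) (list_2 : List Int) : Int :=
  let s := PySem.List.sorted list_2 (fun x => x) false
  let pr := s.foldl (fun (st : List Int × Int) v => (st.1 ++ [st.2 + v], st.2 + v)) ([0], 0)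
  let pre := pr.1
  let m := s.length
  let total := list_1.foldl (fun total a =>
    let lo := pvBisect s a 0 m
    total + (pre.getD lo 0 + a * ((m : Int) - (lo : Int)))) 0
  50 - total

-- ===== PRECONDITION & SPEC =====
def Spec_edgeFitness (list_1 : List Int) (list_2 : List Int) (out : Int) : Prop := out = edgeFitness_alt list_1 list_2
instance (list_1 : List Int) (list_2 : List Int) (out : Int) : Decidable (Spec_edgeFitness list_1 list_2 out) := by unfold Spec_edgeFitness; infer_instance

-- ===== CLAIM (what is proved, stated in full; the proofs are below) =====
def Claim_equal_edgeFitness : Prop := ∀ (list_1 : List Int) (list_2 : List Int), Dom_edgeFitness list_1 list_2 → Spec_edgeFitness list_1 list_2 (edgeFitness list_1 list_2)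

-- ===== LEMMAS AND PROOFS =====

theorem pvSum_map_neg (l : List Int) (f : Int → Int) :
    (l.map (fun b => -(f b))).sum = -((l.map f).sum) := by
  induction l with
  | nil => simp
  | cons v t ih => simp [ih]; ring

-- partial sums of s starting from c
def pvPsums (c : Int) : List Int → List Int
  | [] => []
  | v :: t => (c + v) :: pvPsums (c + v) t

theorem pvPrefix_fold (s : List Int) (p : List Int) (c : Int) :
    s.foldl (fun (st : List Int × Int) v => (st.1 ++ [st.2 + v], st.2 + v)) (p, c)
      = (p ++ pvPsums c s, c + s.sum) := by
  induction s generalizing p c with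
  | nil => simp [pvPsums]
  | cons v t ih => simp [pvPsums, ih, List.append_assoc]; ring

theorem pvPsums_getD (s : List Int) (c : Int) (k : Nat) (hk : k ≤ s.length) :
    (c :: pvPsums c s).getD k 0 = c + (s.take k).sum := by
  induction s generalizing c k with
  | nil =>
    have : k = 0 := by simpa using hk
    subst this; simp
  | cons v t ih =>
    cases k with
    | zero => simp
    | succ k =>
      have := ih (c + v) k (by simpa using hk)
      simpa [pvPsums, List.take_succ_cons, add_assoc] using this

-- the split point of a sorted list at threshold a
def pvK (s : List Int) (a : Int) : Nat := (s.takeWhile (fun b => decide (b < a))).length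

theorem pvK_le (s : List Int) (a : Int) : pvK s a ≤ s.length := by
  simpa [pvK] using (List.takeWhile_prefix (p := fun b => decide (b < a)) (l := s)).length_le

theorem pvSplit (s : List Int) (h : s.Pairwise (· ≤ ·)) (a : Int) :
    (∀ x ∈ s.take (pvK s a), x < a) ∧ (∀ x ∈ s.drop (pvK s a), a ≤ x) := by
  induction s with
  | nil => simp [pvK]
  | cons v t ih =>
    rcases List.pairwise_cons.mp h with ⟨hv, ht⟩
    by_cases hva : v < a
    · have hk : pvK (v :: t) a = pvK t a + 1 := by
        simp [pvK, hva]
      rcases ih ht with ⟨h1, h2⟩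
      refine ⟨?_, ?_⟩
      · intro x hx
        rw [hk, List.take_succ_cons] at hx
        rcases List.mem_cons.mp hx with rfl | hx
        · exact hva
        · exact h1 x hx
      · intro x hx
        rw [hk, List.drop_succ_cons] at hx
        exact h2 x hx
    · have hk : pvK (v :: t) a = 0 := by
        simp [pvK, hva]
      refine ⟨by simp [hk], ?_⟩
      intro x hx
      rw [hk, List.drop_zero] at hx
      rcases List.mem_cons.mp hx with rfl | hx
      · omega
      · exact le_trans (by omega) (hv x hx)

theorem pvBisect_eq (s : List Int) (h : s.Pairwise (· ≤ ·)) (a : Int) :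
    ∀ lo hi, lo ≤ pvK s a → pvK s a ≤ hi → hi ≤ s.length → pvBisect s a lo hi = pvK s a := by
  intro lo hi
  induction hlh : hi - lo using Nat.strong_induction_on generalizing lo hi with
  | _ n ih =>
    intro h1 h2 h3
    rw [pvBisect]
    by_cases hlt : lo < hi
    · simp only [hlt, if_true]
      have hmid1 : lo ≤ (lo + hi) / 2 := by omega
      have hmid2 : (lo + hi) / 2 < hi := by omega
      have hmlen : (lo + hi) / 2 < s.length := by omega
      have hget : s.getD ((lo + hi) / 2) 0 = s[(lo + hi) / 2] := List.getD_eq_getElem s 0 hmlen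
      rcases pvSplit s h a with ⟨hlo, hhi⟩
      by_cases hc : s.getD ((lo + hi) / 2) 0 < a
      · -- mid < pvK : otherwise s[mid] ∈ drop pvK
        have hmk : (lo + hi) / 2 < pvK s a := by
          by_contra hge
          have hmem : s[(lo + hi) / 2] ∈ s.drop (pvK s a) := by
            have heq : s[(lo + hi) / 2]
                = (s.drop (pvK s a))[(lo + hi) / 2 - pvK s a]'(by simp; omega) := by
              rw [List.getElem_drop]
              congr 1
              omega
            rw [heq]
            exact List.getElem_mem _
          have := hhi _ hmem
          rw [hget] at hc; omega
        simp only [hc, if_true]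
        exact ih (hi - ((lo + hi) / 2 + 1)) (by omega) _ _ rfl (by omega) h2 h3
      · have hmk : pvK s a ≤ (lo + hi) / 2 := by
          by_contra hge
          have hmem : s[(lo + hi) / 2] ∈ s.take (pvK s a) := by
            have heq : s[(lo + hi) / 2]
                = (s.take (pvK s a))[(lo + hi) / 2]'(by simp; omega) := by
              rw [List.getElem_take]
            rw [heq]
            exact List.getElem_mem _
          have := hlo _ hmem
          rw [hget] at hc; omega
        simp only [hc, if_false]
        exact ih ((lo + hi) / 2 - lo) (by omega) _ _ rfl h1 hmk (by omega)
    · simp only [hlt, if_false]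
      omega

theorem pvSum_min (s : List Int) (h : s.Pairwise (· ≤ ·)) (a : Int) :
    (s.map (fun b => min a b)).sum
      = (s.take (pvK s a)).sum + a * ((s.length : Int) - (pvK s a : Int)) := by
  rcases pvSplit s h a with ⟨hlo, hhi⟩
  have hk := pvK_le s a
  conv_lhs => rw [← List.take_append_drop (pvK s a) s]
  rw [List.map_append, List.sum_append]
  have h1 : (s.take (pvK s a)).map (fun b => min a b) = s.take (pvK s a) := by
    have := List.map_congr_left (l := s.take (pvK s a)) (f := fun b => min a b)
      (g := fun b => b) (fun x hx => by have := hlo x hx; show min a x = x; omega)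
    simpa using this
  have h2 : (s.drop (pvK s a)).map (fun b => min a b)
      = List.replicate (s.drop (pvK s a)).length a := by
    rw [List.eq_replicate_iff]
    constructor
    · simp
    · intro x hx
      rcases List.mem_map.mp hx with ⟨b, hb, hxb⟩
      have := hhi b hb
      omega
  rw [h1, h2, List.sum_replicate, List.length_drop]
  have : ((s.length - pvK s a : Nat) : Int) = (s.length : Int) - (pvK s a : Int) := by omega
  simp [this]
  ring

-- both sides reduce to 50 - Σ_{a ∈ list_1} Σ_{b ∈ list_2} min a b
theorem edgeFitness_eq_closed (list_1 list_2 : List Int) :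
    edgeFitness list_1 list_2
      = 50 - (list_1.map (fun a => (list_2.map (fun b => min a b)).sum)).sum := by
  unfold edgeFitness
  rw [PySem.List.foldl_pyRange_zero_pyGetD list_1 0
    (fun acc a => (PySem.List.pyRange 0 (PySem.List.len list_2) 1).foldl
      (fun fs j => if a ≤ PySem.List.pyGetD list_2 j 0 then fs - a
        else fs - PySem.List.pyGetD list_2 j 0) acc) 50]
  have hinner : ∀ (a acc : Int),
      (PySem.List.pyRange 0 (PySem.List.len list_2) 1).foldl
        (fun fs j => if a ≤ PySem.List.pyGetD list_2 j 0 then fs - a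
          else fs - PySem.List.pyGetD list_2 j 0) acc
      = acc - (list_2.map (fun b => min a b)).sum := by
    intro a acc
    rw [PySem.List.foldl_pyRange_zero_pyGetD list_2 0
      (fun fs b => if a ≤ b then fs - a else fs - b) acc]
    have : ∀ (fs b : Int), (if a ≤ b then fs - a else fs - b) = fs + (-(min a b)) := by
      intro fs b
      rw [min_def]
      split_ifs <;> ring
    calc list_2.foldl (fun fs b => if a ≤ b then fs - a else fs - b) acc
        = list_2.foldl (fun fs b => fs + (-(min a b))) acc :=
          PySem.List.foldl_congr_mem _ _ _ _ (fun acc x _ => this acc x)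
      _ = acc + (list_2.map (fun b => -(min a b))).sum := PySem.List.foldl_add _ _ _
      _ = acc - (list_2.map (fun b => min a b)).sum := by
          rw [pvSum_map_neg list_2 (fun b => min a b)]; ring
  calc list_1.foldl (fun acc a =>
        (PySem.List.pyRange 0 (PySem.List.len list_2) 1).foldl
          (fun fs j => if a ≤ PySem.List.pyGetD list_2 j 0 then fs - a
            else fs - PySem.List.pyGetD list_2 j 0) acc) 50
      = list_1.foldl (fun acc a => acc + (-(list_2.map (fun b => min a b)).sum)) 50 :=
        PySem.List.foldl_congr_mem _ _ _ _ (fun acc x _ => by rw [hinner x acc]; ring)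
    _ = 50 + (list_1.map (fun a => -(list_2.map (fun b => min a b)).sum)).sum :=
        PySem.List.foldl_add _ _ _
    _ = _ := by
        rw [pvSum_map_neg list_1 (fun a => (list_2.map (fun b => min a b)).sum)]; ring

theorem edgeFitness_alt_eq_closed (list_1 list_2 : List Int) :
    edgeFitness_alt list_1 list_2
      = 50 - (list_1.map (fun a => (list_2.map (fun b => min a b)).sum)).sum := by
  unfold edgeFitness_alt
  set s := PySem.List.sorted list_2 (fun x => x) false with hs
  have hpw : s.Pairwise (· ≤ ·) := PySem.List.sorted_pairwise list_2 (fun x => x)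
  have hperm : s.Perm list_2 := PySem.List.sorted_perm list_2 (fun x => x) false
  simp only [pvPrefix_fold s [0] 0]
  have hterm : ∀ a : Int,
      ((0 : Int) :: pvPsums 0 s).getD (pvBisect s a 0 s.length) 0
        + a * ((s.length : Int) - (pvBisect s a 0 s.length : Int))
      = (list_2.map (fun b => min a b)).sum := by
    intro a
    rw [pvBisect_eq s hpw a 0 s.length (Nat.zero_le _) (pvK_le s a) le_rfl]
    rw [pvPsums_getD s 0 (pvK s a) (pvK_le s a)]
    rw [← List.Perm.sum_eq (List.Perm.map _ hperm)]
    rw [pvSum_min s hpw a]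
    ring
  have : list_1.foldl (fun total a =>
      total + (((0 : Int) :: pvPsums 0 s).getD (pvBisect s a 0 s.length) 0
        + a * ((s.length : Int) - (pvBisect s a 0 s.length : Int)))) 0
      = (list_1.map (fun a => (list_2.map (fun b => min a b)).sum)).sum := by
    rw [PySem.List.foldl_add _ _ _]
    rw [List.map_congr_left (fun a _ => hterm a)]
    ring
  simpa using congrArg (fun t => (50 : Int) - t) this

-- ===== VERDICT (by name: the statement is the Claim_ definition above) =====
theorem edgeFitness_spec : Claim_equal_edgeFitness := by
  intro list_1 list_2 _
  unfold Spec_edgeFitness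
  rw [edgeFitness_eq_closed, edgeFitness_alt_eq_closed]
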